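-- pv_equiv track=rewrite | github.com/viaoceanica/viaoceanica-ai | modules/contabilidade/backend/app/processing.py | _collapse_broken_words
-- ===== SOURCE A (Python) =====
-- def _collapse_broken_words(value: str | None) -> str | None:
--     if not value:
--         return value
--     tokens = value.split()
--     new_tokens: list[str] = []
--     i = 0
--     while i < len(tokens):
--         token = tokens[i]
--         if len(token) == 1 and token.isalpha():
--             j = i
--             buffer: list[str] = []
--             while j < len(tokens) and len(tokens[j]) == 1 and tokens[j].isalpha():
--                 buffer.append(tokens[j])
--                 j += 1
--             next_token = tokens[j] if j < len(tokens) else None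
--             if len(buffer) == 1 and next_token and next_token.isalpha() and next_token.islower() and buffer[0].isupper():
--                 new_tokens.append(buffer[0] + next_token)
--                 i = j + 1
--                 continue
--             if len(buffer) > 1:
--                 new_tokens.append("".join(buffer))
--                 i = j
--                 continue
--             new_tokens.extend(buffer)
--             i = j
--             continue
--         new_tokens.append(token)
--         i += 1
--     return " ".join(new_tokens)
-- ===== SOURCE B (Python) =====
-- def _collapse_broken_words(value):
--     if not value:
--         return value
--     result = []
--     buffer = []
--     for token in value.split():
--         if len(token) == 1 and token.isalpha():
--             buffer.append(token)
--             continue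
--         # boundary: flush the run of single letters
--         if len(buffer) == 1 and buffer[0].isupper() and token.isalpha() and token.islower():
--             result.append(buffer[0] + token)
--         else:
--             if len(buffer) > 1:
--                 result.append("".join(buffer))
--             elif len(buffer) == 1:
--                 result.append(buffer[0])
--             result.append(token)
--         buffer = []
--     if len(buffer) > 1:
--         result.append("".join(buffer))
--     elif len(buffer) == 1:
--         result.append(buffer[0])
--     return " ".join(result)
-- ===== Notes on version B (the rewrite author's own statement) =====
-- stated objective: simpler
-- what changed: Replaced A's index-driven outer while with a nested rescanning while over each single-letter run by a single linear pass that carries the current run in a buffer accumulator and flushes it at each boundary token and at the end.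
import Mathlib
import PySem

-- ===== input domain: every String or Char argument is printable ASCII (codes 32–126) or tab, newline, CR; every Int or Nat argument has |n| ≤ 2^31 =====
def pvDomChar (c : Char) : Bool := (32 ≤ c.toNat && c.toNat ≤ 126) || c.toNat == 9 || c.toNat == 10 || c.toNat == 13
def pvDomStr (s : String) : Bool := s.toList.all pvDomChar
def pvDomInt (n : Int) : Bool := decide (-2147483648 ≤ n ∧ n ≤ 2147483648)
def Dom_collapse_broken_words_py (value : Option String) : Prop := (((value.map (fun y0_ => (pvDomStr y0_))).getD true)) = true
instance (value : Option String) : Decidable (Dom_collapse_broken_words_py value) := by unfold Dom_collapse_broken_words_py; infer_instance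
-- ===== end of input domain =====

-- B replaces A's nested index-while (rescan of the single-letter run at each start) by a single
-- linear pass that carries the current run as accumulator state; objective: simpler one-pass decomposition.

-- ===== PORT A =====

-- Python str.islower(): some cased char and every cased char lowercase; on the printable-ASCII
-- domain cased = letter, so this is exact there (PySem has no string-level islower/isupper).
def pyStrIslower (s : String) : Bool :=
  s.toList.any (fun c => PySem.Chars.isalpha c) &&
  s.toList.all (fun c => !(PySem.Chars.isalpha c) || PySem.Chars.islower c)

-- Python str.isupper(), same construction (exact on the printable-ASCII domain).
def pyStrIsupper (s : String) : Bool :=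
  s.toList.any (fun c => PySem.Chars.isalpha c) &&
  s.toList.all (fun c => !(PySem.Chars.isalpha c) || PySem.Chars.isupper c)

-- 'len(token) == 1 and token.isalpha()' — the test both Pythons apply to a token.
def pvSingle (t : String) : Bool := PySem.Str.len t == 1 && PySem.Str.strIsalpha t

-- A's inner 'while j < len(tokens) and …: buffer.append(tokens[j]); j += 1',
-- returning (buffer, tokens[j:]).
def pvScanA : List String → List String × List String
  | [] => ([], [])
  | t :: ts =>
    if pvSingle t then (t :: (pvScanA ts).1, (pvScanA ts).2)
    else ([], t :: ts)

-- A's outer while over the token list (acc = new_tokens).  The fuel argument is a pure totality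
-- guard (each iteration consumes at least one token, so fuel = tokens.length never runs out).
-- 'next_token and next_token.isalpha()…' truthiness: next_token = "" never occurs in split()
-- output and isalpha "" = false, so the isalpha test subsumes it; buffer[0] under the guard is headI.
def pvLoopA : Nat → List String → List String → List String
  | 0, _, acc => acc
  | _ + 1, [], acc => acc
  | fuel + 1, t :: rest, acc =>
    if pvSingle t then
      match (pvScanA (t :: rest)).2 with
      | nt :: rest' =>
        if (pvScanA (t :: rest)).1.length == 1 && PySem.Str.strIsalpha nt && pyStrIslower nt
            && pyStrIsupper (pvScanA (t :: rest)).1.headI then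
          pvLoopA fuel rest' (acc ++ [(pvScanA (t :: rest)).1.headI ++ nt])
        else if (pvScanA (t :: rest)).1.length > 1 then
          pvLoopA fuel (nt :: rest') (acc ++ [PySem.Str.join "" (pvScanA (t :: rest)).1])
        else
          pvLoopA fuel (nt :: rest') (acc ++ (pvScanA (t :: rest)).1)
      | [] =>
        if (pvScanA (t :: rest)).1.length > 1 then
          pvLoopA fuel [] (acc ++ [PySem.Str.join "" (pvScanA (t :: rest)).1])
        else
          pvLoopA fuel [] (acc ++ (pvScanA (t :: rest)).1)
    else pvLoopA fuel rest (acc ++ [t])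

def collapse_broken_words_py (value : Option String) : Option String :=
  match value with
  | none => none                              -- 'if not value: return value'
  | some s =>
    if s = "" then some s
    else some (PySem.Str.join " "
      (pvLoopA (PySem.Str.split₀ s).length (PySem.Str.split₀ s) []))

-- ===== PORT B =====

-- B's single pass: buffer = the run of single letters seen so far, result = output tokens.
def pvLoopB : List String → List String → List String → List String
  | [], buffer, result =>                     -- after the loop: flush a trailing run
    if buffer.length > 1 then result ++ [PySem.Str.join "" buffer]
    else if buffer.length == 1 then result ++ [buffer.headI]
    else result
  | t :: rest, buffer, result =>
    if pvSingle t then pvLoopB rest (buffer ++ [t]) result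
    else if buffer.length == 1 && pyStrIsupper buffer.headI
            && PySem.Str.strIsalpha t && pyStrIslower t then
      pvLoopB rest [] (result ++ [buffer.headI ++ t])
    else
      pvLoopB rest []
        (result ++ (if buffer.length > 1 then [PySem.Str.join "" buffer]
                    else if buffer.length == 1 then [buffer.headI] else []) ++ [t])

def collapse_broken_words_py_alt (value : Option String) : Option String :=
  match value with
  | none => none
  | some s =>
    if s = "" then some s
    else some (PySem.Str.join " " (pvLoopB (PySem.Str.split₀ s) [] []))

-- ===== PRECONDITION & SPEC =====
def Spec_collapse_broken_words_py (value : Option String) (out : Option String) : Prop := out = collapse_broken_words_py_alt value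
instance (value : Option String) (out : Option String) : Decidable (Spec_collapse_broken_words_py value out) := by unfold Spec_collapse_broken_words_py; infer_instance

-- ===== CLAIM (what is proved, stated in full; the proofs are below) =====
def Claim_equal_collapse_broken_words_py : Prop := ∀ (value : Option String), Dom_collapse_broken_words_py value → Spec_collapse_broken_words_py value (collapse_broken_words_py value)

-- ===== LEMMAS AND PROOFS =====

theorem pvScanA_all (buf : List String) (h : ∀ x ∈ buf, pvSingle x = true) :
    pvScanA buf = (buf, []) := by
  induction buf with
  | nil => rfl
  | cons b bs ih =>
    have hb : pvSingle b = true := h b (by simp)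
    rw [pvScanA, if_pos hb, ih (fun x hx => h x (List.mem_cons_of_mem b hx))]

theorem pvScanA_append_not (buf : List String) (t : String) (l : List String)
    (h : ∀ x ∈ buf, pvSingle x = true) (ht : pvSingle t = false) :
    pvScanA (buf ++ t :: l) = (buf, t :: l) := by
  induction buf with
  | nil => rw [List.nil_append, pvScanA, if_neg (by rw [ht]; exact Bool.false_ne_true)]
  | cons b bs ih =>
    have hb : pvSingle b = true := h b (by simp)
    rw [List.cons_append, pvScanA, if_pos hb,
      ih (fun x hx => h x (List.mem_cons_of_mem b hx))]

theorem pvLoopA_nil (fuel : Nat) (acc : List String) : pvLoopA fuel [] acc = acc := by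
  cases fuel with
  | zero => rfl
  | succ n => rfl

theorem pvLoopA_not_single (f : Nat) (t : String) (rest acc : List String)
    (ht : pvSingle t = false) :
    pvLoopA (f + 1) (t :: rest) acc = pvLoopA f rest (acc ++ [t]) := by
  rw [pvLoopA.eq_def]
  simp [ht]

-- one A-step at the end of the tokens: a trailing run gets joined (if > 1) or emitted
theorem pvLoopA_run_end (f : Nat) (b : String) (bs acc : List String)
    (h : ∀ x ∈ b :: bs, pvSingle x = true) :
    pvLoopA (f + 1) (b :: bs) acc =
      (if (b :: bs).length > 1 then acc ++ [PySem.Str.join "" (b :: bs)] else acc ++ [b]) := by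
  have hb : pvSingle b = true := h b (by simp)
  rw [pvLoopA, if_pos hb, pvScanA_all (b :: bs) h]
  by_cases hl : (b :: bs).length > 1
  · have hl2 : 0 < bs.length := by simp only [List.length_cons] at hl; omega
    simp [hl, hl2, pvLoopA_nil]
  · have : bs = [] := by cases bs with | nil => rfl | cons c cs => simp at hl
    subst this
    simp [pvLoopA_nil]

-- one A-step on a run followed by a non-qualifying boundary token
theorem pvLoopA_run_step (f : Nat) (b t : String) (bs rest acc : List String)
    (h : ∀ x ∈ b :: bs, pvSingle x = true) (ht : pvSingle t = false) :
    pvLoopA (f + 1) ((b :: bs) ++ t :: rest) acc =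
      (if (b :: bs).length == 1 && PySem.Str.strIsalpha t && pyStrIslower t
          && pyStrIsupper b then
        pvLoopA f rest (acc ++ [b ++ t])
      else if (b :: bs).length > 1 then
        pvLoopA f (t :: rest) (acc ++ [PySem.Str.join "" (b :: bs)])
      else
        pvLoopA f (t :: rest) (acc ++ (b :: bs))) := by
  have hb : pvSingle b = true := h b (by simp)
  rw [List.cons_append, pvLoopA, if_pos hb, ← List.cons_append,
    pvScanA_append_not (b :: bs) t rest h ht]
  simp

theorem pvLoopB_eq_pvLoopA (ts : List String) :
    ∀ buf acc fuel, (∀ x ∈ buf, pvSingle x = true) → (buf ++ ts).length ≤ fuel →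
      pvLoopB ts buf acc = pvLoopA fuel (buf ++ ts) acc := by
  induction ts with
  | nil =>
    intro buf acc fuel h hf
    match buf, fuel with
    | [], fuel => simp [pvLoopB, pvLoopA_nil]
    | b :: bs, 0 => simp at hf
    | b :: bs, f + 1 =>
      rw [List.append_nil] at hf ⊢
      rw [pvLoopA_run_end f b bs acc h, pvLoopB]
      by_cases hl : (b :: bs).length > 1
      · have hl2 : 0 < bs.length := by simp only [List.length_cons] at hl; omega
        simp [hl, hl2]
      · have : bs = [] := by cases bs with | nil => rfl | cons c cs => simp at hl
        subst this
        simp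
  | cons t rest ih =>
    intro buf acc fuel h hf
    by_cases hq : pvSingle t = true
    · rw [pvLoopB]
      simp only [hq, if_pos]
      rw [ih (buf ++ [t]) acc fuel
          (by intro x hx
              simp only [List.mem_append, List.mem_singleton] at hx
              rcases hx with h1 | rfl
              · exact h x h1
              · exact hq)
          (by simpa using hf)]
      rw [List.append_assoc, List.singleton_append]
    · have hq' : pvSingle t = false := by simpa using hq
      match buf, fuel with
      | buf, 0 => exfalso; simp [List.length_append] at hf
      | [], f + 1 =>
        rw [pvLoopB, List.nil_append (t :: rest), pvLoopA_not_single f t rest acc hq']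
        have E := ih [] (acc ++ [t]) f (by simp) (by simpa using hf)
        simp only [List.nil_append] at E
        simp [hq', E]
      | b :: bs, f + 1 =>
        have hflen : ((b :: bs) ++ t :: rest).length ≤ f + 1 := hf
        have hfr : (t :: rest).length ≤ f := by
          simp only [List.cons_append, List.length_cons, List.length_append] at hflen ⊢
          omega
        obtain ⟨f', rfl⟩ : ∃ k, f = k + 1 :=
          ⟨f - 1, by simp only [List.length_cons] at hfr; omega⟩
        rw [pvLoopB, pvLoopA_run_step (f' + 1) b t bs rest acc h hq']
        have E1 := ih [] (acc ++ [b ++ t]) (f' + 1) (by simp)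
          (by simp only [List.nil_append, List.length_cons] at hfr ⊢; omega)
        have E2 := ih [] (acc ++ ([b] ++ [t])) f' (by simp)
          (by simp only [List.nil_append, List.length_cons] at hfr ⊢; omega)
        have E3 := ih [] (acc ++ ([PySem.Str.join "" (b :: bs)] ++ [t])) f' (by simp)
          (by simp only [List.nil_append, List.length_cons] at hfr ⊢; omega)
        simp only [List.nil_append] at E1 E2 E3
        simp only [List.singleton_append] at E2 E3
        rw [pvLoopA_not_single (ht := hq'), pvLoopA_not_single (ht := hq')]
        by_cases hbs : bs = []
        · subst hbs
          by_cases ha : PySem.Chars.strIsalpha t.toList = true <;>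
            by_cases hlo : pyStrIslower t = true <;>
              by_cases hup : pyStrIsupper b = true <;>
                simp [hq', ha, hlo, hup, E1, E2, List.append_assoc]
        · have hpos : 0 < bs.length := by
            cases bs with | nil => exact absurd rfl hbs | cons c cs => simp
          simp [hq', hbs, hpos, E3, List.append_assoc]
-- ===== VERDICT (by name: the statement is the Claim_ definition above) =====
theorem collapse_broken_words_py_spec : Claim_equal_collapse_broken_words_py := by
  intro value _
  unfold Spec_collapse_broken_words_py collapse_broken_words_py collapse_broken_words_py_alt
  match value with
  | none => rfl
  | some s =>
    by_cases hs : s = ""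
    · simp [hs]
    · simp only [hs, if_neg, not_false_iff]
      rw [pvLoopB_eq_pvLoopA (PySem.Str.split₀ s) [] [] (PySem.Str.split₀ s).length
          (by simp) (by simp)]
      simp
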